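-- pv_equiv track=rewrite | github.com/EmbeddedLHB/My_python | Machine_Learning_Action/naive_bayes/sina_news_classify.py | text_vectorization
-- ===== SOURCE A (Python) =====
-- def text_vectorization(train_data_list, test_data_list, feature_words):
--     """函数说明: 根据feature_words将文本向量化
--
--     Args:
--         train_data_list: 训练集
--         test_data_list: 测试集
--         feature_words: 特征集
--
--     Returns:
--         train_vec_list: 训练集向量化列表
--         test_vec_list: 测试集向量化列表
--     """
--
--     def text_vectorization_t(text, feature_words_t):
--         text_words = set(text)
--         # 若出现在特征集中，置1，否则置0
--         features = [1 if word in text_words else 0 for word in feature_words_t]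
--         return features
--
--     train_vec_list = [text_vectorization_t(text, feature_words) for text in train_data_list]
--     test_vec_list = [text_vectorization_t(text, feature_words) for text in test_data_list]
--     return train_vec_list, test_vec_list
-- ===== SOURCE B (Python) =====
-- def text_vectorization(train_data_list, test_data_list, feature_words):
--     # Inverted index: word -> all of its positions in feature_words.
--     index = {}
--     for i, w in enumerate(feature_words):
--         index[w] = index.get(w, []) + [i]
--     n = len(feature_words)
--
--     def vec(text):
--         v = [0] * n
--         for word in text:
--             for i in index.get(word, []):
--                 v[i] = 1
--         return v
--
--     return [vec(t) for t in train_data_list], [vec(t) for t in test_data_list]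
-- ===== Notes on version B (the rewrite author's own statement) =====
-- stated objective: alternative
-- what changed: Replaces the per-text membership scan over feature_words with a precomputed inverted index (word -> all positions, keeping duplicates) and marks positions into a zero vector while iterating the text's words.
import Mathlib
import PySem

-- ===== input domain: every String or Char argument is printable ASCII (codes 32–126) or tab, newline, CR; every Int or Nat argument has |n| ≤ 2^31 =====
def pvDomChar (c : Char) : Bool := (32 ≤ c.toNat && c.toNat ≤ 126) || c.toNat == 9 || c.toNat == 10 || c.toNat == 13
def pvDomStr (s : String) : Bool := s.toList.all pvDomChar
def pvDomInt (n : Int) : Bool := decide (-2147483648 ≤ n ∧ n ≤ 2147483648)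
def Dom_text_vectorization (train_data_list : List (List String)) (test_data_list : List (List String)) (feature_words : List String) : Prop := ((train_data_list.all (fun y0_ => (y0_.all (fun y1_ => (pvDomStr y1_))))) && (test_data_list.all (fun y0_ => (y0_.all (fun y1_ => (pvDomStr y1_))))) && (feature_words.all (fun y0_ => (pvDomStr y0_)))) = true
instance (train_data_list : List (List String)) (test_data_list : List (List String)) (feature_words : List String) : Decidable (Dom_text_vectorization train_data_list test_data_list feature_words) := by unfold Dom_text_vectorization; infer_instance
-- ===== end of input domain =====

-- B replaces A's per-text membership scan over feature_words by a precomputed inverted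
-- index (word -> all of its positions) and marks positions into a zero vector while
-- iterating the text's words (alternative algorithm, same results).

-- ===== PORT A =====
-- inner helper text_vectorization_t of A
def pvVecA (text : List String) (feature_words_t : List String) : List Int :=
  let text_words : PySem.Set String := PySem.Set.ofList text
  feature_words_t.map (fun word => if word ∈ text_words then 1 else 0)

def text_vectorization (train_data_list : List (List String)) (test_data_list : List (List String)) (feature_words : List String) : List (List Int) × List (List Int) :=
  let train_vec_list := train_data_list.map (fun text => pvVecA text feature_words)
  let test_vec_list := test_data_list.map (fun text => pvVecA text feature_words)
  (train_vec_list, test_vec_list)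

-- ===== PORT B =====
-- inverted index: for i, w in enumerate(feature_words): index[w] = index.get(w, []) + [i]
def pvIndex (feature_words : List String) : PySem.Dict String (List Int) :=
  (PySem.List.enumerate feature_words).foldl
    (fun d p => d.insert p.2 (d.getD p.2 [] ++ [p.1])) PySem.Dict.empty

-- helper vec of B: v = [0]*n; for word in text: for i in index.get(word, []): v[i] = 1
def pvVecB (index : PySem.Dict String (List Int)) (n : Nat) (text : List String) : List Int :=
  text.foldl
    (fun v word => (index.getD word []).foldl (fun v i => PySem.List.pySetD v i 1) v)
    (List.replicate n (0 : Int))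

def text_vectorization_alt (train_data_list : List (List String)) (test_data_list : List (List String)) (feature_words : List String) : List (List Int) × List (List Int) :=
  let index := pvIndex feature_words
  let n := feature_words.length
  (train_data_list.map (pvVecB index n), test_data_list.map (pvVecB index n))

-- ===== PRECONDITION & SPEC =====
def Spec_text_vectorization (train_data_list : List (List String)) (test_data_list : List (List String)) (feature_words : List String) (out : List (List Int) × List (List Int)) : Prop := out = text_vectorization_alt train_data_list test_data_list feature_words
instance (train_data_list : List (List String)) (test_data_list : List (List String)) (feature_words : List String) (out : List (List Int) × List (List Int)) : Decidable (Spec_text_vectorization train_data_list test_data_list feature_words out) := by unfold Spec_text_vectorization; infer_instance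

-- ===== CLAIM (what is proved, stated in full; the proofs are below) =====
def Claim_equal_text_vectorization : Prop := ∀ (train_data_list : List (List String)) (test_data_list : List (List String)) (feature_words : List String), Dom_text_vectorization train_data_list test_data_list feature_words → Spec_text_vectorization train_data_list test_data_list feature_words (text_vectorization train_data_list test_data_list feature_words)

-- ===== LEMMAS AND PROOFS =====

-- positions of w in fw, offset by s (specification of the inverted index's lists)
def pvPosFrom : List String → Int → String → List Int
  | [], _, _ => []
  | x :: xs, s, w => (if x = w then [s] else []) ++ pvPosFrom xs (s + 1) w

theorem pvIndex_foldl_getD (fw : List String) : ∀ (s : Int) (d : PySem.Dict String (List Int)) (w : String),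
    ((PySem.List.enumerate fw s).foldl (fun d p => d.insert p.2 (d.getD p.2 [] ++ [p.1])) d).getD w []
      = d.getD w [] ++ pvPosFrom fw s w := by
  induction fw with
  | nil => intro s d w; simp [PySem.List.enumerate_nil, pvPosFrom]
  | cons x xs ih =>
    intro s d w
    rw [PySem.List.enumerate_cons]
    simp only [List.foldl_cons]
    rw [ih (s + 1)]
    rw [PySem.Dict.getD_insert]
    by_cases h : w = x
    · subst h; simp [pvPosFrom]
    · simp [pvPosFrom, h, Ne.symm h]

theorem pvIndex_getD (fw : List String) (w : String) :
    (pvIndex fw).getD w [] = pvPosFrom fw 0 w := by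
  unfold pvIndex
  rw [pvIndex_foldl_getD]
  simp [PySem.Dict.empty, PySem.Dict.getD, PySem.Dict.get?]

theorem mem_pvPosFrom (fw : List String) : ∀ (s : Int) (w : String) (i : Int),
    i ∈ pvPosFrom fw s w ↔ ∃ (k : Nat), ∃ (h : k < fw.length), i = s + k ∧ fw[k] = w := by
  induction fw with
  | nil => intro s w i; simp [pvPosFrom]
  | cons x xs ih =>
    intro s w i
    simp only [pvPosFrom, List.mem_append, ih (s + 1)]
    constructor
    · rintro (h | ⟨k, hk, rfl, hw⟩)
      · split at h
        · rename_i hx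
          rcases List.mem_singleton.mp h with rfl
          exact ⟨0, by simp, by simp, by simpa using hx⟩
        · simp at h
      · exact ⟨k + 1, by simpa using hk, by push_cast; ring_nf, by simpa using hw⟩
    · rintro ⟨k, hk, rfl, hw⟩
      cases k with
      | zero => left; simp at hw ⊢; simp [hw]
      | succ k =>
        right
        exact ⟨k, by simpa using hk, by push_cast; ring_nf, by simpa using hw⟩

theorem length_foldl_set (ps : List Int) (v : List Int) :
    (ps.foldl (fun v i => PySem.List.pySetD v i 1) v).length = v.length := by
  induction ps generalizing v with
  | nil => simp
  | cons p ps ih => simp [List.foldl_cons, ih, PySem.List.length_pySetD]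

theorem foldl_set_getElem? (ps : List Int) : ∀ (v : List Int), (∀ i ∈ ps, 0 ≤ i) → ∀ (j : Nat),
    (ps.foldl (fun v i => PySem.List.pySetD v i 1) v)[j]?
      = if (j : Int) ∈ ps ∧ j < v.length then some 1 else v[j]? := by
  induction ps with
  | nil => intro v _ j; simp
  | cons p ps ih =>
    intro v hpos j
    simp only [List.foldl_cons]
    rw [PySem.List.pySetD_of_nonneg _ _ (hpos p (by simp))]
    rw [ih _ (fun i hi => hpos i (by simp [hi])) j]
    rw [List.length_set]
    have h0p : 0 ≤ p := hpos p (by simp)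
    by_cases hlt : j < v.length
    · by_cases hmem : (j : Int) ∈ ps
      · simp [hmem, hlt]
      · by_cases hpj : (j : Int) = p
        · have hj : p.toNat = j := by omega
          simp [hpj, hlt, hj]
        · have hj : p.toNat ≠ j := by omega
          simp [hmem, hpj, hj]
    · have e1 : (v.set p.toNat 1)[j]? = none := List.getElem?_eq_none (by simp; omega)
      have e2 : v[j]? = none := List.getElem?_eq_none (by omega)
      simp [hlt]

theorem pvVecB_fold_getElem? (fw : List String) (text : List String) : ∀ (v : List Int), v.length = fw.length → ∀ (j : Nat),
    (text.foldl (fun v word => ((pvIndex fw).getD word []).foldl (fun v i => PySem.List.pySetD v i 1) v) v)[j]?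
      = if h : j < fw.length then (if fw[j] ∈ text then some 1 else v[j]?) else none := by
  induction text with
  | nil =>
    intro v hv j
    simp only [List.foldl_nil, List.not_mem_nil, if_false]
    split
    · rfl
    · exact List.getElem?_eq_none (by omega)
  | cons word rest ih =>
    intro v hv j
    simp only [List.foldl_cons]
    have hnn : ∀ i ∈ (pvIndex fw).getD word [], 0 ≤ i := by
      intro i hi
      rw [pvIndex_getD, mem_pvPosFrom] at hi
      rcases hi with ⟨k, hk, rfl, _⟩
      positivity
    have hlen : (((pvIndex fw).getD word []).foldl (fun v i => PySem.List.pySetD v i 1) v).length = fw.length := by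
      rw [length_foldl_set]; exact hv
    rw [ih _ hlen j]
    by_cases h : j < fw.length
    · simp only [h, dif_pos]
      rw [foldl_set_getElem? _ _ hnn j]
      simp only [pvIndex_getD]
      by_cases hw : fw[j] = word
      · have hmem : ((j : Int)) ∈ pvPosFrom fw 0 word := by
          rw [mem_pvPosFrom]; exact ⟨j, h, by simp, hw⟩
        have hjv : j < v.length := by omega
        simp [hmem, hjv, List.mem_cons, hw]
      · have hmem : ¬ ((j : Int)) ∈ pvPosFrom fw 0 word := by
          rw [mem_pvPosFrom]; rintro ⟨k, hk, hjk, hkw⟩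
          have hkj : k = j := by omega
          subst hkj; exact hw hkw
        simp [hmem, List.mem_cons, hw]
    · simp [h]

theorem pvVec_eq (fw : List String) (text : List String) :
    pvVecB (pvIndex fw) fw.length text = pvVecA text fw := by
  apply List.ext_getElem?
  intro j
  unfold pvVecB pvVecA
  rw [pvVecB_fold_getElem? fw text _ (by simp) j]
  simp only []
  by_cases h : j < fw.length
  · simp only [h, dif_pos, List.getElem?_map]
    rw [List.getElem?_eq_getElem h]
    simp only [Option.map_some]
    rw [List.getElem?_replicate]
    by_cases hm : fw[j] ∈ text
    · simp [hm, PySem.Set.mem_ofList]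
    · simp [hm, PySem.Set.mem_ofList, h]
  · simp only [h, dif_neg, not_false_iff]
    rw [Eq.comm, List.getElem?_eq_none]
    simp; omega

-- ===== VERDICT (by name: the statement is the Claim_ definition above) =====
theorem text_vectorization_spec : Claim_equal_text_vectorization := by
  intro train test fw _
  unfold Spec_text_vectorization text_vectorization text_vectorization_alt
  have hfun : pvVecB (pvIndex fw) fw.length = fun text => pvVecA text fw := by
    funext text; exact pvVec_eq fw text
  simp [hfun]
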